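-- pv_equiv track=rewrite | github.com/typinghare/study-python | src/encrypt.py | encrypt_block_cipher
-- ===== SOURCE A (Python) =====
-- from typing import List, Optional
--
-- letters: List[str] = [chr(letter) for letter in range(ord('A'), ord('Z') + 1)] + \
--                      [chr(letter) for letter in range(ord('a'), ord('z') + 1)]
--
-- def letter_to_index(letter: str) -> int:
--     """
--     Convert a letter (either uppercase or lowercase) to a zero-based index.
--
--     :param letter: The letter to convert.
--     :return: Zero-based index corresponding to the letter.
--     :raise: ValueError if the letter is not uppercase or lowercase.
--     """
--     if 'A' <= letter <= 'Z':
--         return ord(letter) - ord('A')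
--     elif 'a' <= letter <= 'z':
--         return ord(letter) - ord('a') + 26
--     else:
--         raise ValueError(f'Invalid letter: {letter}')
--
-- def encrypt(num: int, k: int, b: int, m: int) -> int:
--     """
--     Encrypts a number using the affine cipher technique. he affine cipher encryption function is
--     defined as:
--
--         f(x) = (kx + b) mod m
--
--     Where:
--     - x is the number to encrypt,
--     - k is the coefficient,
--     - b is the bias,
--     - m is the modulus, which must be greater than zero.
--
--     :param num: The number to encrypt.
--     :param k: The coefficient to use.
--     :param b: The bias to use.
--     :param m: The modulus to use.
--     :return: The encrypted number.
--     """
--     return (k * num + b) % m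
--
-- def concatenate_integers(int_list: List[int]) -> str:
--     """
--     Concatenates a list of integers into a single string.
--     If an integer is a single digit, it is zero-padded to become a two-digit number string.
--
--     :param int_list: A list of integers to concatenate.
--     :return The concatenated result as a string.
--     """
--     two_digit_list = [f"{n:02d}" for n in int_list]
--
--     return ''.join(two_digit_list)
--
-- def encrypt_block_cipher(text: str, k: int, b: int, width: int) -> int:
--     """
--     Encrypts a text using block cipher technique with affine transformation.
--
--     :param text: The text to encrypt.
--     :param k: The coefficient for the affine cipher.
--     :param b: The bias for the affine cipher.
--     :param width: The width of each block in the text.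
--     :return: The encrypted text as a large integer.
--     """
--     modulus: int = int(concatenate_integers([len(letters)] * width))
--     block_width: int = width * 2
--     index_list: List[int] = [letter_to_index(letter) for letter in text]
--
--     block_list: List[int] = []
--     right: int = len(index_list)
--     while right > 0:
--         left: int = max(0, right - width)
--         window: List[int] = index_list[left:right]
--         block_list.append(int(concatenate_integers(window)))
--         right -= width
--     block_list.reverse()
--
--     encrypted_block_list: List[int] = [encrypt(block, k, b, modulus) for block in block_list]
--     encrypted_block_str_list: List[str] = []
--     for block in encrypted_block_list:
--         block_str: str = str(block)
--         encrypted_block_str_list.append('0' * (block_width - len(block_str)) + block_str)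
--
--     return int(''.join(encrypted_block_str_list))
-- ===== SOURCE B (Python) =====
-- def _letter_index(letter: str) -> int:
--     o = ord(letter)
--     if 65 <= o <= 90:
--         return o - 65
--     if 97 <= o <= 122:
--         return o - 71
--     raise ValueError(f'Invalid letter: {letter}')
--
-- def encrypt_block_cipher(text: str, k: int, b: int, width: int) -> int:
--     # Pure integer arithmetic: no 2-digit strings, no zero-padding, no join/int().
--     # A block of letter indices is their base-100 value; the final concatenation of
--     # zero-padded 2*width-digit blocks is an accumulation with radix 100**width.
--     modulus = 0
--     for _ in range(width):
--         modulus = modulus * 100 + 52        # == int('52' * width)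
--     shift = 100 ** width                    # weight of one block in the result
--     remaining = len(text) % width or width  # length of the (possibly short) first block
--     result = 0
--     cur = 0
--     for ch in text:
--         cur = cur * 100 + _letter_index(ch)
--         remaining -= 1
--         if remaining == 0:
--             result = result * shift + (k * cur + b) % modulus
--             cur = 0
--             remaining = width
--     return result
-- ===== Notes on version B (the rewrite author's own statement) =====
-- stated objective: alternative
-- what changed: A works on decimal strings (builds blocks right-to-left as 2-digit strings, int()-parses them, zero-pads the encrypted blocks and int()-parses the join); B never touches a string: one forward pass accumulates each block as a base-100 integer and folds the encrypted blocks into the result with radix 100**width, the modulus being built numerically.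
import Mathlib
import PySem

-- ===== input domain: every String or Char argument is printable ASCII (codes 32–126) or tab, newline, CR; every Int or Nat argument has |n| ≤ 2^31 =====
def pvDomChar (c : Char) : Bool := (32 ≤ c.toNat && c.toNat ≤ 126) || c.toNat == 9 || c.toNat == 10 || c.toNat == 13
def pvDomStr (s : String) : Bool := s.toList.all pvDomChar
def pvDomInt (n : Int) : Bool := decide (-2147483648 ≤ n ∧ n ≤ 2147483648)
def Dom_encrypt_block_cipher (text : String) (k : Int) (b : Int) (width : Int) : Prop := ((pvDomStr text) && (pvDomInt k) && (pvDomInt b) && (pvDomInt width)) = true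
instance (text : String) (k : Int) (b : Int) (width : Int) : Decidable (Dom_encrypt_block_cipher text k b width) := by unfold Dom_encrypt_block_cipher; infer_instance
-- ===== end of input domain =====

-- B replaces A's decimal-string pipeline (2-digit formatting, int() parsing, zero-padding,
-- join) by pure integer arithmetic in one forward pass (objective: alternative algorithm);
-- the return values agree on all of Pre_.

-- ===== PORT A =====
-- letters = [chr(c) for c in range(ord('A'), ord('Z')+1)] + [chr(c) for c in range(ord('a'), ord('z')+1)]
def pyLettersA : List String :=
  (PySem.List.pyRange 65 91 1).map (fun c => String.mk [Char.ofNat c.toNat]) ++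
  (PySem.List.pyRange 97 123 1).map (fun c => String.mk [Char.ofNat c.toNat])

-- letter_to_index: Python compares the 1-char strings of the text; exact as Char comparison.
-- none = the ValueError branch.
def letterToIndexA? (letter : Char) : Option Int :=
  if 'A' ≤ letter ∧ letter ≤ 'Z' then some ((letter.toNat : Int) - ('A'.toNat : Int))
  else if 'a' ≤ letter ∧ letter ≤ 'z' then some ((letter.toNat : Int) - ('a'.toNat : Int) + 26)
  else none

-- encrypt(num, k, b, m) = (k*num + b) % m
def encryptA (num k b m : Int) : Int := PySem.Int.mod (k * num + b) m

-- f"{n:02d}"  (exact for every int whose str has ≥ 1 char, i.e. all ints A feeds it)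
def fmt02A (n : Int) : List Char :=
  let s := PySem.Int.toChars n
  List.replicate (2 - s.length) '0' ++ s

-- concatenate_integers; the Python str is kept as List Char (''.join = flatten)
def concatIntsA (int_list : List Int) : List Char := (int_list.map fmt02A).flatten

-- the `while right > 0` loop; fuel only makes the recursion structural (each admitted run
-- with width ≥ 1 performs at most index_list.length iterations); int(…) = ofChars?, the
-- .getD 0 is never reached on Pre_ (the window is a nonempty digit string there)
def blockLoopA (idx : List Int) (width : Int) : Nat → Int → List Int → List Int
  | 0, _, acc => acc
  | fuel + 1, right, acc =>
    if 0 < right then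
      let left := max 0 (right - width)
      let window := PySem.List.slice idx (some left) (some right)
      blockLoopA idx width fuel (right - width)
        (acc ++ [(PySem.Int.ofChars? (concatIntsA window)).getD 0])
    else acc

def encrypt_block_cipher (text : String) (k : Int) (b : Int) (width : Int) : Int :=
  -- modulus = int(concatenate_integers([len(letters)] * width)); int('') raises → getD unreachable on Pre_
  let modulus := (PySem.Int.ofChars? (concatIntsA (List.replicate width.toNat ((pyLettersA.length : Int))))).getD 0
  let block_width := width * 2
  -- [letter_to_index(letter) for letter in text]; the raise is outside Pre_, getD unreachable there
  let index_list := text.toList.map (fun c => (letterToIndexA? c).getD 0)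
  let block_list := blockLoopA index_list width index_list.length (index_list.length : Int) []
  let block_list := block_list.reverse
  let encrypted_block_list := block_list.map (fun bl => encryptA bl k b modulus)
  -- the for-loop appending '0' * (block_width - len(block_str)) + block_str
  let encrypted_block_str_list := encrypted_block_list.foldl
    (fun acc bl =>
      let block_str := PySem.Int.toChars bl
      acc ++ [List.replicate (block_width - (block_str.length : Int)).toNat '0' ++ block_str]) []
  (PySem.Int.ofChars? encrypted_block_str_list.flatten).getD 0

-- ===== PORT B =====
-- _letter_index via ord arithmetic; none = the ValueError branch
def letterIndexB? (letter : Char) : Option Int :=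
  if 65 ≤ (letter.toNat : Int) ∧ (letter.toNat : Int) ≤ 90 then some ((letter.toNat : Int) - 65)
  else if 97 ≤ (letter.toNat : Int) ∧ (letter.toNat : Int) ≤ 122 then some ((letter.toNat : Int) - 71)
  else none

def encrypt_block_cipher_alt (text : String) (k : Int) (b : Int) (width : Int) : Int :=
  -- for _ in range(width): modulus = modulus * 100 + 52
  let modulus := (PySem.List.pyRange 0 width).foldl (fun m _ => m * 100 + 52) 0
  -- shift = 100 ** width  (width ≥ 1 on every admitted input)
  let shift : Int := (100 : Int) ^ width.toNat
  -- remaining = len(text) % width or width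
  let r := PySem.Int.mod (text.toList.length : Int) width
  let remaining0 := if r = 0 then width else r
  -- one pass over the text, state = (result, cur, remaining)
  let st := text.toList.foldl
    (fun (st : Int × Int × Int) ch =>
      let cur := st.2.1 * 100 + (letterIndexB? ch).getD 0
      let remaining := st.2.2 - 1
      if remaining = 0 then (st.1 * shift + PySem.Int.mod (k * cur + b) modulus, 0, width)
      else (st.1, cur, remaining)) (0, 0, remaining0)
  st.1

-- ===== PRECONDITION & SPEC =====
-- exactly the inputs on which the Python A returns: width ≥ 1 (otherwise int('') on the
-- modulus raises ValueError), a nonempty text (otherwise the final int('') raises), and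
-- only ASCII letters in it (letter_to_index raises ValueError on anything else)
def Pre_encrypt_block_cipher (text : String) (k : Int) (b : Int) (width : Int) : Prop :=
  1 ≤ width ∧ text ≠ "" ∧
    text.toList.all (fun c => (65 ≤ c.toNat && c.toNat ≤ 90) || (97 ≤ c.toNat && c.toNat ≤ 122)) = true

instance (text : String) (k : Int) (b : Int) (width : Int) : Decidable (Pre_encrypt_block_cipher text k b width) := by
  unfold Pre_encrypt_block_cipher; infer_instance

def pvWitness_encrypt_block_cipher : String × Int × Int × Int := ("ab", 3, 5, 2)

def Spec_encrypt_block_cipher (text : String) (k : Int) (b : Int) (width : Int) (out : Int) : Prop := out = encrypt_block_cipher_alt text k b width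
instance (text : String) (k : Int) (b : Int) (width : Int) (out : Int) : Decidable (Spec_encrypt_block_cipher text k b width out) := by unfold Spec_encrypt_block_cipher; infer_instance

-- ===== CLAIM (what is proved, stated in full; the proofs are below) =====
def Claim_equal_encrypt_block_cipher : Prop := ∀ (text : String) (k : Int) (b : Int) (width : Int), Dom_encrypt_block_cipher text k b width → Pre_encrypt_block_cipher text k b width → Spec_encrypt_block_cipher text k b width (encrypt_block_cipher text k b width)

-- ===== LEMMAS AND PROOFS =====

/- ---- 1. int() on a pure digit string is the decimal fold ---- -/

-- decimal value folds (Nat and Int accumulator versions)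
def dN (a : Nat) (cs : List Char) : Nat := cs.foldl (fun a c => a * 10 + (c.toNat - 48)) a
def dI (a : Int) (cs : List Char) : Int := cs.foldl (fun a c => a * 10 + ((c.toNat : Int) - 48)) a

-- the digit-scanning loop inside PySem's int(), characterised through its equations
theorem go_run (g : List Char → Bool → Nat → Option Nat)
    (h0 : ∀ b a, g [] b a = if b = true then some a else none)
    (h1 : ∀ c b a, g [c] b a =
      if c.isDigit = true then g [] true (a * 10 + (c.toNat - '0'.toNat))
      else if c = '_' ∧ b = true then none else none)
    (h2 : ∀ c d t b a, g (c :: d :: t) b a =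
      if c.isDigit = true then g (d :: t) true (a * 10 + (c.toNat - '0'.toNat))
      else if c = '_' ∧ b = true then (if d.isDigit = true then g (d :: t) false a else none)
      else none) :
    ∀ cs b a, cs ≠ [] → (∀ c ∈ cs, c.isDigit = true) → g cs b a = some (dN a cs) := by
  intro cs
  induction cs with
  | nil => intro b a h; exact absurd rfl h
  | cons c rest ih =>
    intro b a _ hd
    have hc : c.isDigit = true := hd c (by simp)
    cases rest with
    | nil =>
      rw [h1, if_pos hc, h0, if_pos rfl]
      rfl
    | cons d t =>
      rw [h2, if_pos hc, ih true _ (by simp) (fun x hx => hd x (by simp [hx]))]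
      rfl

-- the shape of the digit arm of PySem's int(); f/g get instantiated with its private loop
theorem digitsArm (f : List Char → Option Nat) (g : List Char → Bool → Nat → Option Nat)
    (hfg : ∀ l, f l = match l with | [] => none | cs => g cs false 0)
    (h0 : ∀ b a, g [] b a = if b = true then some a else none)
    (h1 : ∀ c b a, g [c] b a =
      if c.isDigit = true then g [] true (a * 10 + (c.toNat - '0'.toNat))
      else if c = '_' ∧ b = true then none else none)
    (h2 : ∀ c d t b a, g (c :: d :: t) b a =
      if c.isDigit = true then g (d :: t) true (a * 10 + (c.toNat - '0'.toNat))
      else if c = '_' ∧ b = true then (if d.isDigit = true then g (d :: t) false a else none)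
      else none)
    (l : List Char) (hne : l ≠ []) (hd : ∀ x ∈ l, x.isDigit = true) :
    (Option.map (fun n : Int => n) (do let a ← f l; pure ((a : Nat) : Int))) = some ((dN 0 l : Nat) : Int) := by
  obtain ⟨c, r, rfl⟩ := List.exists_cons_of_ne_nil hne
  rw [hfg]
  rw [show (match c :: r with | [] => none | cs => g cs false 0) = g (c :: r) false 0 from rfl,
    go_run g h0 h1 h2 _ false 0 (by simp) hd]
  rfl

theorem isDigit_toNat_bounds (x : Char) (h : x.isDigit = true) : 48 ≤ x.toNat ∧ x.toNat ≤ 57 := by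
  simp [Char.isDigit] at h
  exact ⟨UInt32.le_iff_toNat_le.mp h.1, UInt32.le_iff_toNat_le.mp h.2⟩

theorem ofChars?_digitsN (cs : List Char) (hne : cs ≠ []) (hd : ∀ c ∈ cs, c.isDigit = true) :
    PySem.Int.ofChars? cs = some ((dN 0 cs : Nat) : Int) := by
  obtain ⟨c, cs', rfl⟩ := List.exists_cons_of_ne_nil hne
  have hnospace : ∀ x ∈ c :: cs', PySem.Int.isIntSpace x = false := by
    intro x hx
    have h48 := (isDigit_toNat_bounds x (hd x hx)).1
    have hne' : ∀ y : Char, y.toNat < 48 → x ≠ y := by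
      intro y hy h; subst h; omega
    simp [PySem.Int.isIntSpace, hne' ' ' (by decide), hne' '\t' (by decide), hne' '\n' (by decide),
      hne' '\r' (by decide), hne' '\x0b' (by decide), hne' '\x0c' (by decide)]
  have hstrip1 : List.dropWhile PySem.Int.isIntSpace (c :: cs') = c :: cs' := by
    rw [List.dropWhile_eq_self_iff]
    intro hl
    simp [hnospace c (by simp)]
  have hstrip2 : List.dropWhile PySem.Int.isIntSpace (c :: cs').reverse = (c :: cs').reverse := by
    rw [List.dropWhile_eq_self_iff]
    intro hl
    simp only [Bool.not_eq_true]
    refine hnospace _ ?_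
    have hm := List.getElem_mem hl
    simp only [List.mem_reverse] at hm
    exact hm
  simp only [PySem.Int.ofChars?, hstrip1, hstrip2, List.reverse_reverse]
  split
  case _ ds h =>
    obtain ⟨rfl, rfl⟩ := List.cons_eq_cons.mp h
    exact absurd (isDigit_toNat_bounds '-' (hd '-' (by simp))).1 (by decide)
  case _ ds h =>
    obtain ⟨rfl, rfl⟩ := List.cons_eq_cons.mp h
    exact absurd (isDigit_toNat_bounds '+' (hd '+' (by simp))).1 (by decide)
  case _ ds h h2 =>
    have hd' := hd
    generalize hgen : (c :: cs') = l at hd' ⊢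
    refine digitsArm _ ?g ?hfg ?h0 ?h1 ?h2 l (by rw [← hgen]; simp) hd'
    case hfg => intro l'; rfl
    case h0 => exact fun _ _ => rfl
    case h1 => exact fun _ _ _ => rfl
    case h2 => exact fun _ _ _ _ _ => rfl

-- cast the Nat fold to the Int fold (digit chars have code ≥ 48)
theorem dN_cast (cs : List Char) (hd : ∀ c ∈ cs, c.isDigit = true) :
    ∀ a : Nat, ((dN a cs : Nat) : Int) = dI (a : Int) cs := by
  induction cs with
  | nil => intro a; rfl
  | cons c rest ih =>
    intro a
    have h48 := (isDigit_toNat_bounds c (hd c (by simp))).1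
    have : ((a * 10 + (c.toNat - 48) : Nat) : Int) = (a : Int) * 10 + ((c.toNat : Int) - 48) := by
      push_cast [h48]; ring
    simpa [dN, dI] using (this ▸ ih (fun x hx => hd x (by simp [hx])) (a * 10 + (c.toNat - 48)))

theorem ofChars?_digitsI (cs : List Char) (hne : cs ≠ []) (hd : ∀ c ∈ cs, c.isDigit = true) :
    PySem.Int.ofChars? cs = some (dI 0 cs) := by
  rw [ofChars?_digitsN cs hne hd, dN_cast cs hd 0]
  norm_num

/- ---- 2. decimal folds of the strings A builds ---- -/

theorem dI_append (a : Int) (xs ys : List Char) : dI a (xs ++ ys) = dI (dI a xs) ys :=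
  List.foldl_append

theorem dI_shift (cs : List Char) : ∀ a : Int, dI a cs = a * 10 ^ cs.length + dI 0 cs := by
  induction cs with
  | nil => intro a; simp [dI]
  | cons c rest ih =>
    intro a
    have h1 : dI a (c :: rest) = dI (a * 10 + ((c.toNat : Int) - 48)) rest := rfl
    have h2 : dI 0 (c :: rest) = dI (((c.toNat : Int) - 48)) rest := by simp [dI]
    rw [h1, h2, ih (a * 10 + ((c.toNat : Int) - 48)), ih ((c.toNat : Int) - 48)]
    simp [List.length_cons, pow_succ]
    ring

theorem dI_replicate_zero (z : Nat) : ∀ a : Int, dI a (List.replicate z '0') = a * 10 ^ z := by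
  induction z with
  | zero => intro a; simp [dI]
  | succ m ih =>
    intro a
    rw [List.replicate_succ, show dI a ('0' :: List.replicate m '0') = dI (a * 10 + (('0'.toNat : Int) - 48)) (List.replicate m '0') from rfl]
    rw [ih, show '0'.toNat = 48 from rfl]
    push_cast
    ring

theorem digitChar_val : ∀ m : Nat, m < 10 → (Nat.digitChar m).toNat - 48 = m ∧ (Nat.digitChar m).isDigit = true := by
  decide

theorem dN_toDigits (n : Nat) : dN 0 (Nat.toDigits 10 n) = n := by
  induction n using Nat.strong_induction_on with
  | _ n ih =>
    by_cases h : n < 10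
    · interval_cases n <;> rfl
    · have h10 : 10 ≤ n := by omega
      rw [Nat.toDigits_of_base_le (by norm_num) h10]
      have hmod := digitChar_val (n % 10) (Nat.mod_lt n (by norm_num))
      have hdiv : n / 10 < n := Nat.div_lt_self (by omega) (by norm_num)
      have : dN 0 (Nat.toDigits 10 (n / 10) ++ [(n % 10).digitChar]) =
          dN (dN 0 (Nat.toDigits 10 (n / 10))) [(n % 10).digitChar] := List.foldl_append
      rw [this, ih (n / 10) hdiv]
      show (n / 10) * 10 + ((n % 10).digitChar.toNat - 48) = n
      rw [hmod.1]
      omega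

theorem toDigits_isDigit (n : Nat) : ∀ c ∈ Nat.toDigits 10 n, c.isDigit = true :=
  fun _ hc => Nat.isDigit_of_mem_toDigits (by norm_num) (by norm_num) hc

theorem dI_toDigits (n : Nat) : ∀ a : Int, dI a (Nat.toDigits 10 n) = a * 10 ^ (Nat.toDigits 10 n).length + n := by
  intro a
  have h := dN_cast (Nat.toDigits 10 n) (toDigits_isDigit n) 0
  rw [dN_toDigits] at h
  norm_num at h
  rw [dI_shift, ← h]

-- a zero-padded decimal of a nonnegative integer, as A builds them
theorem padVal (D : Nat) (e : Int) (he : 0 ≤ e) (hlen : (Nat.toDigits 10 e.toNat).length ≤ D) :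
    ∀ a : Int, dI a (List.replicate (D - (Nat.toDigits 10 e.toNat).length) '0' ++ Nat.toDigits 10 e.toNat) = a * 10 ^ D + e := by
  intro a
  rw [dI_append, dI_replicate_zero, dI_toDigits]
  rw [mul_assoc, ← pow_add, Nat.sub_add_cancel hlen]
  omega

theorem toChars_nonneg (e : Int) (he : 0 ≤ e) : PySem.Int.toChars e = Nat.toDigits 10 e.toNat := by
  rw [PySem.Int.toChars, if_neg (by omega)]

/- ---- 3. the modulus: int('52'*width)  =  B's numeric fold ---- -/

-- B's modulus recurrence
def MI : Nat → Int
  | 0 => 0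
  | w + 1 => MI w * 100 + 52

theorem MI_lin (w : Nat) : 99 * MI w = 52 * 100 ^ w - 52 := by
  induction w with
  | zero => simp [MI]
  | succ m ih =>
    show 99 * (MI m * 100 + 52) = 52 * 100 ^ (m + 1) - 52
    rw [pow_succ]
    nlinarith [ih]

theorem MI_pos (w : Nat) (hw : 1 ≤ w) : 52 ≤ MI w := by
  obtain ⟨m, rfl⟩ := Nat.exists_eq_add_of_le' hw
  have : (0 : Int) ≤ MI m := by
    have := MI_lin m
    have hp : (1 : Int) ≤ 100 ^ m := one_le_pow₀ (by norm_num)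
    nlinarith
  show 52 ≤ MI (m + 1)
  rw [show MI (m + 1) = MI m * 100 + 52 from rfl]
  nlinarith

theorem MI_lt (w : Nat) : MI w < 100 ^ w := by
  have := MI_lin w
  have hp : (1 : Int) ≤ 100 ^ w := one_le_pow₀ (by norm_num)
  nlinarith

theorem foldl_MI (m : Nat) : ∀ a : Int, (List.range m).foldl (fun acc _ => acc * 100 + 52) a = a * 100 ^ m + MI m := by
  induction m with
  | zero => intro a; simp [MI]
  | succ j ih =>
    intro a
    rw [List.range_succ, List.foldl_append, ih]
    show (a * 100 ^ j + MI j) * 100 + 52 = a * 100 ^ (j + 1) + MI (j + 1)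
    rw [show MI (j + 1) = MI j * 100 + 52 from rfl, pow_succ]
    ring

-- both modulus strings are '52' repeated width times
theorem modulus_chars_eq (m : Nat) :
    concatIntsA (List.replicate m ((52 : Int))) = (List.replicate m (['5', '2'] : List Char)).flatten := by
  induction m with
  | zero => rfl
  | succ m ih =>
    rw [List.replicate_succ, List.replicate_succ, List.flatten_cons, ← ih]
    rfl

theorem dI_52rep (m : Nat) : ∀ a : Int, dI a ((List.replicate m (['5', '2'] : List Char)).flatten) = a * 100 ^ m + MI m := by
  induction m with
  | zero => intro a; simp [dI, MI]
  | succ j ih =>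
    intro a
    rw [List.replicate_succ, List.flatten_cons, dI_append, ih]
    show (dI a ['5', '2']) * 100 ^ j + MI j = a * 100 ^ (j + 1) + MI (j + 1)
    have h52 : dI a ['5', '2'] = a * 100 + 52 := by
      show (a * 10 + ((('5'.toNat : Nat) : Int) - 48)) * 10 + ((('2'.toNat : Nat) : Int) - 48) = a * 100 + 52
      rw [show '5'.toNat = 53 from rfl, show '2'.toNat = 50 from rfl]
      push_cast
      ring
    rw [h52, show MI (j + 1) = MI j * 100 + 52 from rfl, pow_succ]
    have hiden : 52 * 100 ^ j + MI j = MI j * 100 + 52 := by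
      have := MI_lin j
      nlinarith
    nlinarith [hiden]

theorem rep52_digits (m : Nat) : ∀ c ∈ (List.replicate m (['5', '2'] : List Char)).flatten, c.isDigit = true := by
  intro c hc
  rw [List.mem_flatten] at hc
  obtain ⟨l, hl, hcl⟩ := hc
  rw [List.mem_replicate] at hl
  rw [hl.2] at hcl
  have : c = '5' ∨ c = '2' := by simpa using hcl
  rcases this with rfl | rfl <;> decide

/- ---- 4. block values: int of 2-digit concatenations = base-100 fold ---- -/

def b100 (a : Int) (l : List Int) : Int := l.foldl (fun a x => a * 100 + x) a

theorem fmt02_eq (x : Int) (hx : 0 ≤ x) :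
    fmt02A x = List.replicate (2 - (Nat.toDigits 10 x.toNat).length) '0' ++ Nat.toDigits 10 x.toNat := by
  simp only [fmt02A, toChars_nonneg x hx]

theorem fmt02_val (x : Int) (hx : 0 ≤ x) (hx' : x < 100) (a : Int) : dI a (fmt02A x) = a * 100 + x := by
  rw [fmt02_eq x hx]
  have hlen : (Nat.toDigits 10 x.toNat).length ≤ 2 :=
    Nat.toDigits_length 10 x.toNat 2 (by norm_num) (by omega)
  have := padVal 2 x hx hlen a
  rw [this]
  norm_num

theorem fmt02_digits (x : Int) (hx : 0 ≤ x) : ∀ c ∈ fmt02A x, c.isDigit = true := by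
  intro c hc
  rw [fmt02_eq x hx, List.mem_append] at hc
  rcases hc with h | h
  · rw [List.eq_of_mem_replicate h]; decide
  · exact toDigits_isDigit _ c h

theorem toChars_ne_nil (e : Int) : PySem.Int.toChars e ≠ [] := by
  rw [PySem.Int.toChars]
  split
  · simp
  · have := Nat.length_toDigits_pos (b := 10) (n := e.toNat)
    intro h
    rw [h] at this
    simp at this

theorem fmt02_ne_nil (x : Int) : fmt02A x ≠ [] := by
  simp only [fmt02A]
  intro h
  exact toChars_ne_nil x (List.append_eq_nil_iff.mp h).2

theorem dI_blockchars (l : List Int) (hb : ∀ x ∈ l, 0 ≤ x ∧ x < 100) :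
    ∀ a : Int, dI a ((l.map fmt02A).flatten) = b100 a l := by
  induction l with
  | nil => intro a; rfl
  | cons x rest ih =>
    intro a
    rw [List.map_cons, List.flatten_cons, dI_append, fmt02_val x (hb x (by simp)).1 (hb x (by simp)).2]
    rw [ih (fun y hy => hb y (by simp [hy]))]
    rfl

theorem ofChars?_block (l : List Int) (hne : l ≠ []) (hb : ∀ x ∈ l, 0 ≤ x ∧ x < 100) :
    PySem.Int.ofChars? ((l.map fmt02A).flatten) = some (b100 0 l) := by
  obtain ⟨x, rest, rfl⟩ := List.exists_cons_of_ne_nil hne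
  rw [ofChars?_digitsI]
  · rw [dI_blockchars _ hb 0]
  · simp only [List.map_cons, List.flatten_cons]
    intro h
    exact fmt02_ne_nil x (List.append_eq_nil_iff.mp h).1
  · intro c hc
    rw [List.mem_flatten] at hc
    obtain ⟨cl, hcl, hc2⟩ := hc
    obtain ⟨y, hy, rfl⟩ := List.mem_map.mp hcl
    exact fmt02_digits y (hb y hy).1 c hc2

/- ---- 5. the final concatenation of padded encrypted blocks ---- -/

-- A's padded block string as a function of the encrypted value
def padA (width2 : Int) (e : Int) : List Char :=
  List.replicate (width2 - ((PySem.Int.toChars e).length : Int)).toNat '0' ++ PySem.Int.toChars e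

theorem padA_val (w : Nat) (hw : 1 ≤ w) (e : Int) (he : 0 ≤ e) (helt : e < 100 ^ w) (a : Int) :
    dI a (padA ((w : Int) * 2) e) = a * 100 ^ w + e := by
  have hcast : ((100 : Int) ^ w) = ((10 ^ (2 * w) : Nat) : Int) := by
    push_cast
    rw [pow_mul]
    norm_num
  have hlt : e.toNat < 10 ^ (2 * w) := by
    rw [hcast] at helt
    omega
  have hlen : (Nat.toDigits 10 e.toNat).length ≤ 2 * w :=
    Nat.toDigits_length 10 e.toNat (2 * w) (by omega) hlt
  have harg : ((w : Int) * 2 - ((Nat.toDigits 10 e.toNat).length : Int)).toNat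
      = 2 * w - (Nat.toDigits 10 e.toNat).length := by
    omega
  rw [padA, toChars_nonneg e he, harg, padVal (2 * w) e he hlen a]
  rw [hcast]
  push_cast [pow_mul]
  try norm_num

theorem padA_digits (e : Int) (he : 0 ≤ e) : ∀ c ∈ padA w2 e, c.isDigit = true := by
  intro c hc
  rw [padA, List.mem_append] at hc
  rcases hc with h | h
  · rw [List.eq_of_mem_replicate h]; decide
  · rw [toChars_nonneg e he] at h
    exact toDigits_isDigit _ c h

theorem padA_ne_nil (e : Int) : padA w2 e ≠ [] := by
  rw [padA]
  intro h
  exact toChars_ne_nil e (List.append_eq_nil_iff.mp h).2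

theorem dI_padlist (w : Nat) (hw : 1 ≤ w) (E : List Int) (hb : ∀ e ∈ E, 0 ≤ e ∧ e < 100 ^ w) :
    ∀ a : Int, dI a ((E.map (padA ((w : Int) * 2))).flatten) = E.foldl (fun acc e => acc * 100 ^ w + e) a := by
  induction E with
  | nil => intro a; rfl
  | cons e rest ih =>
    intro a
    rw [List.map_cons, List.flatten_cons, dI_append,
      padA_val w hw e (hb e (by simp)).1 (hb e (by simp)).2 a,
      ih (fun y hy => hb y (by simp [hy]))]
    rfl

theorem ofChars?_padlist (w : Nat) (hw : 1 ≤ w) (E : List Int) (hne : E ≠ [])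
    (hb : ∀ e ∈ E, 0 ≤ e ∧ e < 100 ^ w) :
    PySem.Int.ofChars? ((E.map (padA ((w : Int) * 2))).flatten)
      = some (E.foldl (fun acc e => acc * 100 ^ w + e) 0) := by
  obtain ⟨e, rest, rfl⟩ := List.exists_cons_of_ne_nil hne
  rw [ofChars?_digitsI]
  · rw [dI_padlist w hw _ hb 0]
  · simp only [List.map_cons, List.flatten_cons]
    intro h
    exact padA_ne_nil e (List.append_eq_nil_iff.mp h).1
  · intro c hc
    rw [List.mem_flatten] at hc
    obtain ⟨cl, hcl, hc2⟩ := hc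
    obtain ⟨y, hy, rfl⟩ := List.mem_map.mp hcl
    exact padA_digits y (hb y hy).1 c hc2

/- ---- 6. A-side loop machinery (block boundaries) ---- -/

-- the two letter-index helpers agree on every Char
theorem letterIndex_eq (c : Char) : letterToIndexA? c = letterIndexB? c := by
  have hle : ∀ a b : Char, (a ≤ b) ↔ (a.toNat ≤ b.toNat) := by
    intro a b
    rw [Char.le_def, UInt32.le_iff_toNat_le]
    rfl
  simp only [letterToIndexA?, letterIndexB?, hle]
  rw [show 'A'.toNat = 65 from rfl, show 'Z'.toNat = 90 from rfl,
    show 'a'.toNat = 97 from rfl, show 'z'.toNat = 122 from rfl]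
  split_ifs with p q p' q' <;> first
    | rfl
    | (exfalso; omega)
    | (congr 1; omega)

theorem letterIndexB_bounds (c : Char) : 0 ≤ (letterIndexB? c).getD 0 ∧ (letterIndexB? c).getD 0 < 100 := by
  simp only [letterIndexB?]
  split_ifs <;> simp <;> omega

-- the boundary pairs A's while-loop produces, topmost window first
def chunksDown (s w : Int) : Nat → List (Int × Int)
  | 0 => [(0, s)]
  | t + 1 => (s + w * t, s + w * (t + 1)) :: chunksDown s w t

-- int(concatenate_integers(window)) for the window with boundaries p
def blockValP (idx : List Int) (p : Int × Int) : Int :=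
  (PySem.Int.ofChars? ((PySem.List.slice idx (some p.1) (some p.2)).map fmt02A).flatten).getD 0

theorem blockLoopA_stop (idx : List Int) (w : Int) (fuel : Nat) (right : Int) (acc : List Int)
    (h : right ≤ 0) : blockLoopA idx w fuel right acc = acc := by
  cases fuel with
  | zero => rfl
  | succ fuel => simp only [blockLoopA, if_neg (by omega : ¬ 0 < right)]

theorem blockLoopA_run (idx : List Int) (w s : Int) (hw : 1 ≤ w) (hs : 1 ≤ s) (hsw : s ≤ w) :
    ∀ (t : Nat) (fuel : Nat) (acc : List Int), t + 1 ≤ fuel →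
      blockLoopA idx w fuel (s + w * t) acc = acc ++ (chunksDown s w t).map (blockValP idx) := by
  intro t
  induction t with
  | zero =>
    intro fuel acc hf
    match fuel, hf with
    | fuel + 1, _ =>
      simp only [blockLoopA]
      rw [if_pos (by omega : 0 < s + w * (0 : Nat))]
      have hmax : max 0 (s + w * (0 : Nat) - w) = 0 := by simp; omega
      rw [hmax, blockLoopA_stop idx w fuel _ _ (by simp; omega)]
      simp [chunksDown, blockValP, concatIntsA]
  | succ t ih =>
    intro fuel acc hf
    match fuel, hf with
    | fuel + 1, _ =>
      simp only [blockLoopA]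
      rw [if_pos (by push_cast; nlinarith : 0 < s + w * ((t : Nat) + 1 : Nat))]
      have hmax : max 0 (s + w * ((t : Nat) + 1 : Nat) - w) = s + w * t := by
        push_cast; rw [max_eq_right] <;> nlinarith
      have harg : s + w * ((t : Nat) + 1 : Nat) - w = s + w * t := by push_cast; ring
      rw [harg, ih fuel _ (by omega)]
      have hmax2 : max 0 (s + w * (t : Int)) = s + w * (t : Int) :=
        max_eq_right (by nlinarith)
      simp only [chunksDown, List.map_cons, List.append_assoc, List.cons_append, List.nil_append,
        blockValP, concatIntsA]
      push_cast
      rw [hmax2]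

-- closed form of the reversed A-side chunk list
theorem chunksDown_reverse (s w : Int) (t : Nat) :
    (chunksDown s w t).reverse =
      (0, s) :: (List.range t).map (fun j : Nat => (s + w * (j : Int), s + w * ((j : Int) + 1))) := by
  induction t with
  | zero => rfl
  | succ t ih =>
    simp only [chunksDown, List.reverse_cons, ih, List.range_succ, List.map_append, List.map_cons,
      List.map_nil, List.cons_append]

/- ---- 7. slices: decomposition of the index list into the blocks ---- -/

theorem slice_closed (xs : List Int) (a c : Int) (h0 : 0 ≤ a) (hac : a ≤ c) :
    PySem.List.slice xs (some a) (some c) = (xs.drop a.toNat).take (c.toNat - a.toNat) := by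
  rw [show a = ((a.toNat : Nat) : Int) from (Int.toNat_of_nonneg h0).symm,
    show c = ((c.toNat : Nat) : Int) from (Int.toNat_of_nonneg (by omega)).symm,
    PySem.List.slice_natCast]
  simp only [Int.toNat_natCast]

theorem slice_length (xs : List Int) (a c : Int) (h0 : 0 ≤ a) (hac : a ≤ c) (hc : c ≤ xs.length) :
    (PySem.List.slice xs (some a) (some c)).length = (c - a).toNat := by
  rw [slice_closed xs a c h0 hac]
  simp only [List.length_take, List.length_drop]
  omega

theorem slice_append (xs : List Int) (a c e : Int) (h0 : 0 ≤ a) (hac : a ≤ c) (hce : c ≤ e)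
    (he : e ≤ xs.length) :
    PySem.List.slice xs (some a) (some c) ++ PySem.List.slice xs (some c) (some e)
      = PySem.List.slice xs (some a) (some e) := by
  rw [slice_closed xs a c h0 hac, slice_closed xs c e (by omega) hce, slice_closed xs a e h0 (by omega)]
  rw [show xs.drop c.toNat = (xs.drop a.toNat).drop (c.toNat - a.toNat) by
    rw [List.drop_drop]; congr 1; omega]
  rw [show e.toNat - a.toNat = (c.toNat - a.toNat) + (e.toNat - c.toNat) by omega, List.take_add]

theorem slice_full (xs : List Int) : PySem.List.slice xs (some 0) (some (xs.length : Int)) = xs := by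
  rw [slice_closed xs 0 (xs.length : Int) le_rfl (by positivity)]
  simp

-- the forward block boundaries (first block may be short)
def cutsP (s w : Int) (t : Nat) : List (Int × Int) :=
  (0, s) :: (List.range t).map (fun j : Nat => (s + w * (j : Int), s + w * ((j : Int) + 1)))

theorem cutsP_flatten (xs : List Int) (s w : Int) (hs : 1 ≤ s) (hw : 1 ≤ w) :
    ∀ t : Nat, s + w * t ≤ (xs.length : Int) →
      ((cutsP s w t).map (fun p => PySem.List.slice xs (some p.1) (some p.2))).flatten
        = PySem.List.slice xs (some 0) (some (s + w * t)) := by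
  intro t
  induction t with
  | zero =>
    intro hb
    simp [cutsP]
  | succ t ih =>
    intro hb
    have hb' : s + w * t ≤ (xs.length : Int) := by push_cast at hb ⊢; nlinarith
    have step : ((cutsP s w (t + 1)).map (fun p => PySem.List.slice xs (some p.1) (some p.2))).flatten
        = ((cutsP s w t).map (fun p => PySem.List.slice xs (some p.1) (some p.2))).flatten
          ++ PySem.List.slice xs (some (s + w * t)) (some (s + w * (t + 1))) := by
      simp only [cutsP, List.range_succ, List.map_append, List.map_cons, List.map_nil,
        List.cons_append, List.flatten_cons, List.flatten_append]
      push_cast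
      simp [List.append_assoc]
    rw [step, ih hb']
    rw [slice_append xs 0 (s + w * t) (s + w * (t + 1)) le_rfl (by nlinarith) (by push_cast; nlinarith) (by push_cast at hb ⊢; nlinarith)]
    push_cast
    ring_nf

theorem cutsP_bounds (s w n : Int) (t : Nat) (hs : 1 ≤ s) (hsw : s ≤ w) (hn : s + w * t = n) :
    ∀ p ∈ cutsP s w t, 0 ≤ p.1 ∧ p.1 < p.2 ∧ p.2 ≤ n := by
  intro p hp
  rcases List.mem_cons.mp hp with rfl | hp
  · refine ⟨le_rfl, by omega, by nlinarith [Int.ofNat_zero_le t]⟩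
  · obtain ⟨j, hj, rfl⟩ := List.mem_map.mp hp
    rw [List.mem_range] at hj
    have hj' : (j : Int) + 1 ≤ (t : Int) := by exact_mod_cast hj
    refine ⟨by nlinarith [Int.ofNat_zero_le j], by nlinarith, by nlinarith⟩

/- ---- 8. B-side loop machinery ---- -/

-- one step of B's fold, on the letter-index value
def stepB (shift modulus width k b : Int) (st : Int × Int × Int) (x : Int) : Int × Int × Int :=
  let cur := st.2.1 * 100 + x
  let remaining := st.2.2 - 1
  if remaining = 0 then (st.1 * shift + PySem.Int.mod (k * cur + b) modulus, 0, width)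
  else (st.1, cur, remaining)

theorem stepB_chunk (sh mo wd k b : Int) :
    ∀ (chunk : List Int), chunk ≠ [] → ∀ (res cur : Int),
      chunk.foldl (stepB sh mo wd k b) (res, cur, (chunk.length : Int))
        = (res * sh + PySem.Int.mod (k * b100 cur chunk + b) mo, 0, wd) := by
  intro chunk
  induction chunk with
  | nil => intro h; exact absurd rfl h
  | cons x xs ih =>
    intro _ res cur
    rw [List.foldl_cons]
    have hstep : stepB sh mo wd k b (res, cur, ((x :: xs).length : Int)) x
        = if (xs.length : Int) = 0 then (res * sh + PySem.Int.mod (k * (cur * 100 + x) + b) mo, 0, wd)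
          else (res, cur * 100 + x, (xs.length : Int)) := by
      simp only [stepB, List.length_cons]
      push_cast
      ring_nf
    cases xs with
    | nil =>
      rw [hstep, if_pos (by simp)]
      rfl
    | cons y t =>
      rw [hstep, if_neg (by simp; omega)]
      rw [ih (by simp) res (cur * 100 + x)]
      rfl

theorem stepB_chain (sh mo wd k b : Int) (wN : Nat) (hw : 1 ≤ wN) (hwd : wd = (wN : Int)) :
    ∀ (chunks : List (List Int)), (∀ ch ∈ chunks, ch.length = wN) → ∀ res : Int,
      chunks.foldl (fun st ch => ch.foldl (stepB sh mo wd k b) st) (res, 0, wd)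
        = (chunks.foldl (fun acc ch => acc * sh + PySem.Int.mod (k * b100 0 ch + b) mo) res, 0, wd) := by
  intro chunks
  induction chunks with
  | nil => intro _ res; rfl
  | cons c rest ih =>
    intro hlen res
    rw [List.foldl_cons, List.foldl_cons]
    have hc : c.length = wN := hlen c (by simp)
    have hne : c ≠ [] := by
      intro h; rw [h] at hc; simp at hc; omega
    rw [show (res, (0 : Int), wd) = (res, (0 : Int), (c.length : Int)) by rw [hc, hwd]]
    rw [stepB_chunk sh mo wd k b c hne res 0]
    exact ih (fun x hx => hlen x (by simp [hx])) _

/- ---- 9. the main proof ---- -/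

-- ===== VERDICT (by name: the statement is the Claim_ definition above) =====
theorem encrypt_block_cipher_spec : Claim_equal_encrypt_block_cipher := by
  intro text k b width hdom hpre
  obtain ⟨hw, hne, hlet⟩ := hpre
  unfold Spec_encrypt_block_cipher encrypt_block_cipher encrypt_block_cipher_alt
  simp only [letterIndex_eq, List.length_map]
  set wN : Nat := width.toNat with hwN
  have hwcast : width = (wN : Int) := by omega
  have hwN1 : 1 ≤ wN := by omega
  -- the index list
  set idx : List Int := text.toList.map (fun c => (letterIndexB? c).getD 0) with hidx
  have hidxlen : idx.length = text.toList.length := by rw [hidx, List.length_map]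
  have hidxb : ∀ x ∈ idx, 0 ≤ x ∧ x < 100 := by
    intro x hx
    obtain ⟨c, _, rfl⟩ := List.mem_map.mp hx
    exact letterIndexB_bounds c
  -- the modulus on both sides is MI wN
  have hmodB : (PySem.List.pyRange 0 width).foldl (fun m _ => m * 100 + 52) 0 = MI wN := by
    rw [hwcast, PySem.List.pyRange_zero_natCast, List.foldl_map, foldl_MI wN 0]
    simp
  have h52ne : (List.replicate wN (['5', '2'] : List Char)).flatten ≠ [] := by
    intro hemp
    have hlen2 : ((List.replicate wN (['5', '2'] : List Char)).flatten).length = 0 := by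
      rw [hemp]; rfl
    rw [List.length_flatten, List.map_replicate] at hlen2
    simp [List.sum_replicate] at hlen2
    omega
  have hmodA : (PySem.Int.ofChars? (concatIntsA (List.replicate width.toNat ((pyLettersA.length : Int))))).getD 0 = MI wN := by
    rw [show ((pyLettersA.length : Nat) : Int) = (52 : Int) from by decide, modulus_chars_eq]
    rw [ofChars?_digitsI _ h52ne (rep52_digits wN), dI_52rep wN 0]
    simp
  rw [hmodA, hmodB]
  -- decompose the text length as s + width * t with 1 ≤ s ≤ width
  have hne' : text.toList ≠ [] := fun h => hne (String.toList_eq_nil_iff.mp h)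
  have hn1 : 1 ≤ (text.toList.length : Int) := by
    have := List.length_pos_iff.mpr hne'
    omega
  have hr : PySem.Int.mod (text.toList.length : Int) width = (text.toList.length : Int) % width :=
    PySem.Int.mod_eq_emod_of_pos (by omega)
  obtain ⟨s, t, hs, hsw, ht, hstart⟩ :
      ∃ (s : Int) (t : Nat), 1 ≤ s ∧ s ≤ width ∧
        (text.toList.length : Int) = s + width * t ∧
        (if PySem.Int.mod (text.toList.length : Int) width = 0 then width
          else PySem.Int.mod (text.toList.length : Int) width) = s := by
    set n : Int := (text.toList.length : Int) with hn
    have h0 : 0 ≤ n % width := Int.emod_nonneg n (by omega)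
    have h1 : n % width < width := Int.emod_lt_of_pos n (by omega)
    have hdiv : width * (n / width) + n % width = n := Int.ediv_add_emod n width
    by_cases hz : n % width = 0
    · refine ⟨width, (n / width - 1).toNat, by omega, le_refl _, ?_, by rw [hr, hz]; simp⟩
      have hq1 : 1 ≤ n / width := by
        by_contra h
        have h0' : n / width ≤ 0 := by omega
        nlinarith
      rw [Int.toNat_of_nonneg (by omega)]
      nlinarith
    · refine ⟨n % width, ((n - n % width) / width).toNat, by omega, by omega, ?_, by rw [hr, if_neg hz]⟩
      have hdvd : n - n % width = width * (n / width) := by omega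
      have hq0 : 0 ≤ n / width := Int.ediv_nonneg (by omega) (by omega)
      rw [hdvd, Int.mul_ediv_cancel_left _ (by omega), Int.toNat_of_nonneg hq0]
      omega
  have hfuel : t + 1 ≤ text.toList.length := by
    have : (t : Int) + 1 ≤ (text.toList.length : Int) := by nlinarith
    exact_mod_cast this
  rw [hstart]
  have htIdx : ((idx.length : Nat) : Int) = s + width * t := by rw [hidxlen]; exact ht
  have hfuelIdx : t + 1 ≤ idx.length := by rw [hidxlen]; exact hfuel
  -- ---- A side ----
  rw [show text.toList.length = idx.length from hidxlen.symm]
  rw [show ((idx.length : Nat) : Int) = s + width * (t : Int) from htIdx]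
  rw [blockLoopA_run idx width s hw hs hsw t idx.length [] hfuelIdx, List.nil_append]
  rw [← List.map_reverse, chunksDown_reverse]
  rw [show ((0, s) :: (List.range t).map (fun j : Nat => (s + width * (j : Int), s + width * ((j : Int) + 1)))) = cutsP s width t from rfl]
  -- block values are base-100 folds
  have hbnds := cutsP_bounds s width ((idx.length : Int)) t hs hsw htIdx.symm
  have hblock : ∀ p ∈ cutsP s width t, blockValP idx p = b100 0 (PySem.List.slice idx (some p.1) (some p.2)) := by
    intro p hp
    obtain ⟨h1, h2, h3⟩ := hbnds p hp
    have hsl : PySem.List.slice idx (some p.1) (some p.2) ≠ [] := by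
      intro h
      have := slice_length idx p.1 p.2 h1 (by omega) (by exact_mod_cast h3)
      rw [h] at this
      simp at this
      omega
    have hsb : ∀ x ∈ PySem.List.slice idx (some p.1) (some p.2), 0 ≤ x ∧ x < 100 := by
      intro x hx
      refine hidxb x ?_
      simp only [PySem.List.slice] at hx
      exact List.mem_of_mem_drop (List.mem_of_mem_take hx)
    rw [blockValP, ofChars?_block _ hsl hsb]
    rfl
  -- the encrypted block values with their bounds
  have hMpos : 0 < MI wN := lt_of_lt_of_le (by norm_num) (MI_pos wN hwN1)
  have hEpt : ∀ p : Int × Int, 0 ≤ encryptA (blockValP idx p) k b (MI wN) ∧ encryptA (blockValP idx p) k b (MI wN) < 100 ^ wN :=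
    fun p => ⟨PySem.Int.mod_nonneg _ hMpos, lt_of_lt_of_le (PySem.Int.mod_lt _ hMpos) (le_of_lt (MI_lt wN))⟩
  -- fold A's string pipeline away
  have hpadfold : ∀ (E : List Int), E.foldl
      (fun acc bl => acc ++ [List.replicate (width * 2 - ((PySem.Int.toChars bl).length : Int)).toNat '0' ++ PySem.Int.toChars bl]) []
        = E.map (padA ((wN : Int) * 2)) := by
    intro E
    rw [show (fun (acc : List (List Char)) bl => acc ++ [List.replicate (width * 2 - ((PySem.Int.toChars bl).length : Int)).toNat '0' ++ PySem.Int.toChars bl])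
        = (fun acc bl => acc ++ [padA ((wN : Int) * 2) bl]) by rw [hwcast]; rfl]
    exact (PySem.List.foldl_append_singleton_eq_map _ _ []).trans (by simp)
  rw [hpadfold]
  rw [show List.map (fun bl => encryptA bl k b (MI wN)) (List.map (blockValP idx) (cutsP s width t))
      = List.map (fun p => encryptA (blockValP idx p) k b (MI wN)) (cutsP s width t) from by
    rw [List.map_map]; rfl]
  rw [ofChars?_padlist wN hwN1 _ (by simp [cutsP])
    (by intro e he; obtain ⟨p, hp, rfl⟩ := List.mem_map.mp he; exact hEpt p)]
  simp only [Option.getD_some]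
  rw [List.foldl_map]
  -- ---- B side ----
  rw [show text.toList.foldl
      (fun (st : Int × Int × Int) ch =>
        let cur := st.2.1 * 100 + (letterIndexB? ch).getD 0
        let remaining := st.2.2 - 1
        if remaining = 0 then (st.1 * ((100 : Int) ^ width.toNat) + PySem.Int.mod (k * cur + b) (MI wN), 0, width)
        else (st.1, cur, remaining)) (0, 0, s)
      = idx.foldl (stepB ((100 : Int) ^ width.toNat) (MI wN) width k b) (0, 0, s) by
    rw [hidx, List.foldl_map]
    rfl]
  have hdecomp : idx = ((cutsP s width t).map (fun p => PySem.List.slice idx (some p.1) (some p.2))).flatten := by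
    rw [cutsP_flatten idx s width hs hw t (by rw [htIdx]), ← htIdx, slice_full]
  rw [show idx.foldl (stepB ((100 : Int) ^ width.toNat) (MI wN) width k b) (0, 0, s)
      = (((cutsP s width t).map (fun p => PySem.List.slice idx (some p.1) (some p.2))).flatten).foldl
        (stepB ((100 : Int) ^ width.toNat) (MI wN) width k b) (0, 0, s) by rw [← hdecomp]]
  rw [List.foldl_flatten]
  -- first (possibly short) block, then the chain of full blocks
  rw [show (cutsP s width t).map (fun p => PySem.List.slice idx (some p.1) (some p.2))
      = PySem.List.slice idx (some 0) (some s)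
        :: ((List.range t).map (fun j : Nat => (s + width * (j : Int), s + width * ((j : Int) + 1)))).map
          (fun p => PySem.List.slice idx (some p.1) (some p.2)) from rfl]
  rw [List.foldl_cons]
  have hsle : s ≤ (idx.length : Int) := by
    rw [htIdx]
    nlinarith [Int.natCast_nonneg t]
  have hs0len : (PySem.List.slice idx (some 0) (some s)).length = s.toNat := by
    rw [slice_length idx 0 s le_rfl (by omega) hsle]
    simp
  have hs0ne : PySem.List.slice idx (some 0) (some s) ≠ [] := by
    intro h
    rw [h] at hs0len
    simp at hs0len
    omega
  rw [show ((0 : Int), (0 : Int), s) = ((0 : Int), (0 : Int), ((PySem.List.slice idx (some 0) (some s)).length : Int)) by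
    rw [hs0len, Int.toNat_of_nonneg (show (0 : Int) ≤ s by omega)]]
  rw [stepB_chunk _ _ _ _ _ _ hs0ne 0 0]
  have hrestlen : ∀ ch ∈ ((List.range t).map (fun j : Nat => (s + width * (j : Int), s + width * ((j : Int) + 1)))).map
      (fun p => PySem.List.slice idx (some p.1) (some p.2)), ch.length = wN := by
    intro ch hch
    obtain ⟨p, hp, rfl⟩ := List.mem_map.mp hch
    obtain ⟨h1, h2, h3⟩ := hbnds p (List.mem_cons_of_mem _ hp)
    obtain ⟨j, hj, rfl⟩ := List.mem_map.mp hp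
    rw [slice_length idx _ _ h1 (by omega) (by exact_mod_cast h3)]
    rw [show s + width * ((j : Int) + 1) - (s + width * (j : Int)) = width by ring, hwcast]
    simp
  rw [stepB_chain _ _ _ _ _ wN hwN1 hwcast _ hrestlen]
  simp only []
  -- both sides are now the same fold over the block list
  rw [List.foldl_map]
  have hshift : ((100 : Int) ^ width.toNat) = (100 : Int) ^ wN := by rw [hwN]
  rw [hshift]
  have hfirst : (0 : Int) * (100 : Int) ^ wN + PySem.Int.mod (k * b100 0 (PySem.List.slice idx (some 0) (some s)) + b) (MI wN)
      = 0 * 100 ^ wN + encryptA (blockValP idx (0, s)) k b (MI wN) := by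
    rw [hblock (0, s) (by simp [cutsP])]
    rfl
  rw [hfirst]
  have hcongr : ∀ (init : Int),
      ((List.range t).map (fun j : Nat => (s + width * (j : Int), s + width * ((j : Int) + 1)))).foldl
        (fun acc p => acc * 100 ^ wN + PySem.Int.mod (k * b100 0 (PySem.List.slice idx (some p.1) (some p.2)) + b) (MI wN)) init
      = ((List.range t).map (fun j : Nat => (s + width * (j : Int), s + width * ((j : Int) + 1)))).foldl
        (fun acc p => acc * 100 ^ wN + encryptA (blockValP idx p) k b (MI wN)) init := by
    intro init
    refine PySem.List.foldl_congr_mem _ _ _ _ ?_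
    intro acc p hp
    rw [hblock p (List.mem_cons_of_mem _ hp)]
    rfl
  rw [show (cutsP s width t) = ((0, s) :: (List.range t).map (fun j : Nat => (s + width * (j : Int), s + width * ((j : Int) + 1)))) from rfl]
  rw [List.foldl_cons]
  rw [← hcongr]
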